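-- pv_equiv track=rewrite | github.com/ragia-abdallah/Python-Labs | Lab 1/Q 9/main.py | remove_odds
-- ===== SOURCE A (Python) =====
-- def remove_odds(lst):
--     odds = []
--     for i in lst:
--         if i % 2 != 0:
--             odds.append(i)
--
--     for i in odds:
--         lst.remove(i)
--
--     return lst
-- ===== SOURCE B (Python) =====
-- def remove_odds(lst):
--     w = 0
--     for v in lst:
--         if v % 2 == 0:
--             lst[w] = v
--             w += 1
--     del lst[w:]
--     return lst
-- ===== Notes on version B (the rewrite author's own statement) =====
-- stated objective: alternative
-- what changed: Replaces the collect-odds-then-repeated-lst.remove scheme (each remove rescans the list) with a single-pass in-place two-pointer compaction: evens are written forward at a write index and the tail is truncated once.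
import Mathlib
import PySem

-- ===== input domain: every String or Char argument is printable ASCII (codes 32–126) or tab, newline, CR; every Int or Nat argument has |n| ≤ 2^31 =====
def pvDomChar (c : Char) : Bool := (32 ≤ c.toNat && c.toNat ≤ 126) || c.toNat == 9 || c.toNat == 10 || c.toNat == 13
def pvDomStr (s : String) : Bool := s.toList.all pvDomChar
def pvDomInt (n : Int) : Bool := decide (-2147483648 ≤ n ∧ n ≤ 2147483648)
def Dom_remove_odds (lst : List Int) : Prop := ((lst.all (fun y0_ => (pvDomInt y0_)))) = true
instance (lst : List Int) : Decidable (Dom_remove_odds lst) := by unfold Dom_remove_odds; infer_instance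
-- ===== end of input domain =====

-- B replaces the collect-odds-then-repeated-remove scheme with a single-pass in-place
-- two-pointer compaction (alternative single-pass algorithm; Python A and B both mutate
-- lst in place, the proof is about the returned value).

-- ===== PORT A =====
-- literal port of A: first collect the odd elements, then remove each (first occurrence)
-- from lst; lst.remove always succeeds here, so the .getD fallback of remove? is unreachable
def remove_odds (lst : List Int) : List Int :=
  let odds := lst.foldl (fun odds i => if PySem.Int.mod i 2 ≠ 0 then odds ++ [i] else odds) []
  odds.foldl (fun acc i => (PySem.List.remove? acc i).getD acc) lst

-- ===== PORT B =====
-- literal port of B: write index w, copy each even element forward, truncate tail (del lst[w:])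
def remove_odds_alt (lst : List Int) : List Int :=
  let s := lst.foldl
    (fun (s : List Int × Nat) v =>
      if PySem.Int.mod v 2 = 0 then (s.1.set s.2 v, s.2 + 1) else s)
    (lst, 0)
  s.1.take s.2

-- ===== PRECONDITION & SPEC =====
def Spec_remove_odds (lst : List Int) (out : List Int) : Prop := out = remove_odds_alt lst
instance (lst : List Int) (out : List Int) : Decidable (Spec_remove_odds lst out) := by unfold Spec_remove_odds; infer_instance

-- ===== CLAIM (what is proved, stated in full; the proofs are below) =====
def Claim_equal_remove_odds : Prop := ∀ (lst : List Int), Dom_remove_odds lst → Spec_remove_odds lst (remove_odds lst)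

-- ===== LEMMAS AND PROOFS =====

def pvEven (x : Int) : Bool := decide (x % 2 = 0)

theorem pv_mod2 (x : Int) : PySem.Int.mod x 2 = x % 2 :=
  PySem.Int.mod_eq_emod_of_pos (by norm_num)

-- removing values that all differ from the head leaves the head in place
theorem pv_fold_remove_cons (v : Int) (odds : List Int) (hv : ∀ i ∈ odds, i ≠ v) :
    ∀ acc : List Int,
      odds.foldl (fun acc i => (PySem.List.remove? acc i).getD acc) (v :: acc)
        = v :: odds.foldl (fun acc i => (PySem.List.remove? acc i).getD acc) acc := by
  induction odds with
  | nil => intro acc; simp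
  | cons i odds ih =>
    intro acc
    have hne : v ≠ i := (hv i (by simp)).symm
    have h1 : PySem.List.remove? (v :: acc) i = (PySem.List.remove? acc i).map (v :: ·) :=
      PySem.List.remove?_cons_of_ne acc hne
    simp only [List.foldl_cons, h1]
    cases h : PySem.List.remove? acc i with
    | none => simpa [h] using ih (fun j hj => hv j (by simp [hj])) acc
    | some a => simpa [h] using ih (fun j hj => hv j (by simp [hj])) a

-- removing the odd elements one by one leaves exactly the even sublist, in order
theorem pv_A_aux (xs : List Int) :
    (xs.filter (fun i => decide (i % 2 = 1))).foldl
        (fun acc i => (PySem.List.remove? acc i).getD acc) xs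
      = xs.filter pvEven := by
  induction xs with
  | nil => simp
  | cons x xs ih =>
    by_cases hx : x % 2 = 0
    · have hx1 : ¬ (x % 2 = 1) := by omega
      have h1 : (x :: xs).filter (fun i => decide (i % 2 = 1))
          = xs.filter (fun i => decide (i % 2 = 1)) := by simp [hx1]
      have h2 := pv_fold_remove_cons x (xs.filter (fun i => decide (i % 2 = 1)))
        (fun i hi => by
          have := List.of_mem_filter hi
          simp only [decide_eq_true_eq] at this
          omega) xs
      rw [h1, h2, ih]
      simp [pvEven, hx]
    · have hx1 : x % 2 = 1 := by omega
      have h1 : (x :: xs).filter (fun i => decide (i % 2 = 1))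
          = x :: xs.filter (fun i => decide (i % 2 = 1)) := by simp [hx1]
      rw [h1, List.foldl_cons, PySem.List.remove?_cons_self, Option.getD_some, ih]
      simp [pvEven, hx]

-- A removes exactly the odd elements
theorem pv_A_eq_filter (lst : List Int) :
    remove_odds lst = lst.filter pvEven := by
  unfold remove_odds
  rw [PySem.List.foldl_append_ite_eq_filter]
  have hp : (fun i : Int => decide (PySem.Int.mod i 2 ≠ 0))
      = (fun i : Int => decide (i % 2 = 1)) := by
    funext i
    rw [decide_eq_decide, pv_mod2]
    omega
  rw [List.nil_append, hp, pv_A_aux]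

theorem pv_set_append_length (E : List Int) (r v : Int) (R : List Int) :
    (E ++ r :: R).set E.length v = E ++ v :: R := by
  induction E with
  | nil => simp
  | cons e E ih => simp [ih]

-- invariant of B's compaction loop: evens written at the front, untouched suffix behind
theorem pv_B_inv (xs : List Int) :
    ∀ E R : List Int, xs.length ≤ R.length →
      xs.foldl (fun (s : List Int × Nat) v =>
          if v % 2 = 0 then (s.1.set s.2 v, s.2 + 1) else s) (E ++ R, E.length)
        = ((E ++ xs.filter pvEven) ++ R.drop (xs.filter pvEven).length,
           E.length + (xs.filter pvEven).length) := by
  induction xs with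
  | nil => intro E R _; simp
  | cons v xs ih =>
    intro E R hlen
    cases R with
    | nil => simp at hlen
    | cons r R' =>
      by_cases hv : v % 2 = 0
      · rw [List.foldl_cons, if_pos hv, pv_set_append_length]
        have h2 : (E ++ [v]).length = E.length + 1 := by simp
        have h3 := ih (E ++ [v]) R'
          (by simpa using Nat.le_of_succ_le_succ (by simpa using hlen))
        rw [show E ++ v :: R' = (E ++ [v]) ++ R' by simp, ← h2, h3]
        simp [pvEven, hv, h2, Nat.add_assoc, Nat.add_comm 1]
      · rw [List.foldl_cons, if_neg hv]
        have h3 := ih E (r :: R') (Nat.le_of_succ_le (by simpa using hlen))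
        rw [h3]
        simp [pvEven, hv]

theorem pv_B_eq_filter (lst : List Int) :
    remove_odds_alt lst = lst.filter pvEven := by
  unfold remove_odds_alt
  simp only [pv_mod2]
  have h := pv_B_inv lst [] lst (le_refl _)
  simp only [List.nil_append, List.length_nil, Nat.zero_add] at h
  rw [h]
  simp

-- ===== VERDICT (by name: the statement is the Claim_ definition above) =====
theorem remove_odds_spec : Claim_equal_remove_odds := by
  intro lst _
  unfold Spec_remove_odds
  rw [pv_A_eq_filter, pv_B_eq_filter]
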